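-- pv_equiv track=rewrite | github.com/theplantpsychologist/SEARCH-22.5 | database/tilings/build_topologies.py | get_ordered_internal_edges
-- ===== SOURCE A (Python) =====
-- def get_ordered_internal_edges(N):
--     """Returns a strictly sorted list of all possible internal edges."""
--     edges = []
--     # Orthogonal
--     for i in range(N):
--         for j in range(1, N):
--             edges.append(tuple(sorted(((i, j), (i+1, j)))))
--             edges.append(tuple(sorted(((j, i), (j, i+1)))))
--     # Diagonals
--     for x in range(N):
--         for y in range(N):
--             edges.append(tuple(sorted(((x, y), (x+1, y+1)))))
--             edges.append(tuple(sorted(((x+1, y), (x, y+1)))))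
--     return sorted(edges)
-- ===== SOURCE B (Python) =====
-- def get_ordered_internal_edges(N):
--     """Returns a strictly sorted list of all possible internal edges.
--
--     Single pass: emit edges grouped by their smaller endpoint (a, b) in
--     lexicographic order, with the four possible partners of (a, b) emitted
--     in increasing order, so the list is already sorted and no sort is needed.
--     """
--     edges = []
--     for a in range(N):
--         for b in range(N + 1):
--             if a >= 1 and b <= N - 1:
--                 edges.append(((a, b), (a, b + 1)))      # vertical
--             if b >= 1:
--                 edges.append(((a, b), (a + 1, b - 1)))  # anti-diagonal
--             if 1 <= b <= N - 1:
--                 edges.append(((a, b), (a + 1, b)))      # horizontal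
--             if b <= N - 1:
--                 edges.append(((a, b), (a + 1, b + 1)))  # diagonal
--     return edges
-- ===== Notes on version B (the rewrite author's own statement) =====
-- stated objective: faster
-- what changed: Instead of appending all edges in generation order and sorting the whole list, B emits the edges directly in sorted order in one pass, grouped by the lexicographically smaller endpoint (a,b) with the up-to-four partners of each (a,b) emitted in increasing order, so no sort is performed; intended as faster (O(N^2 log N) -> O(N^2)), a timing run measured about 3x at the largest size both finished but could not confirm the label at sizes where both time out.
import Mathlib
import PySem

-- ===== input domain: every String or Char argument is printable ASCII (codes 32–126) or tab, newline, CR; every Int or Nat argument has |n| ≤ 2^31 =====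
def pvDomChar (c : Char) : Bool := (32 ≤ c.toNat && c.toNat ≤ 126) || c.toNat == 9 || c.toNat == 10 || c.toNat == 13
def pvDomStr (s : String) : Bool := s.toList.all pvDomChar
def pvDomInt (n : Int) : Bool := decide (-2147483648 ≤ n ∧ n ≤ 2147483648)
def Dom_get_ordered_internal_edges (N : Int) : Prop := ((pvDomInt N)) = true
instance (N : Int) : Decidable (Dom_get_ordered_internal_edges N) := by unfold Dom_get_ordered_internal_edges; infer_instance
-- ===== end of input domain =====

-- B builds the edge list directly in sorted order (grouped by the lexicographically
-- smaller endpoint, partners emitted in increasing order), so the final sort of A disappears.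


-- ===== PORT A =====

-- Python's lexicographic order on int pairs, as the sort key: (Int ×ₗ Int) is the lex order
def pvKey (e : (Int × Int) × (Int × Int)) : Lex (Int × Int) ×ₗ Lex (Int × Int) :=
  toLex (toLex e.1, toLex e.2)

-- exact port of tuple(sorted((p, q))) on two int pairs: the stable 2-element insertion
-- sort — q is put first iff q < p in Python's (lexicographic) tuple order
def pvPairSorted (p q : Int × Int) : (Int × Int) × (Int × Int) :=
  if toLex q < toLex p then (q, p) else (p, q)

def get_ordered_internal_edges (N : Int) : List ((Int × Int) × (Int × Int)) :=
  let edges : List ((Int × Int) × (Int × Int)) := []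
  -- Orthogonal
  let edges := (PySem.List.pyRange 0 N 1).foldl (fun acc i =>
      (PySem.List.pyRange 1 N 1).foldl (fun acc j =>
        (acc ++ [pvPairSorted (i, j) (i + 1, j)]) ++ [pvPairSorted (j, i) (j, i + 1)]) acc) edges
  -- Diagonals
  let edges := (PySem.List.pyRange 0 N 1).foldl (fun acc x =>
      (PySem.List.pyRange 0 N 1).foldl (fun acc y =>
        (acc ++ [pvPairSorted (x, y) (x + 1, y + 1)]) ++ [pvPairSorted (x + 1, y) (x, y + 1)]) acc) edges
  PySem.List.sorted edges pvKey

-- ===== PORT B =====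

def get_ordered_internal_edges_alt (N : Int) : List ((Int × Int) × (Int × Int)) :=
  (PySem.List.pyRange 0 N 1).foldl (fun acc a =>
    (PySem.List.pyRange 0 (N + 1) 1).foldl (fun acc b =>
      let acc := if 1 ≤ a ∧ b ≤ N - 1 then acc ++ [((a, b), (a, b + 1))] else acc
      let acc := if 1 ≤ b then acc ++ [((a, b), (a + 1, b - 1))] else acc
      let acc := if 1 ≤ b ∧ b ≤ N - 1 then acc ++ [((a, b), (a + 1, b))] else acc
      if b ≤ N - 1 then acc ++ [((a, b), (a + 1, b + 1))] else acc) acc) []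

-- ===== PRECONDITION & SPEC =====
def Spec_get_ordered_internal_edges (N : Int) (out : List ((Int × Int) × (Int × Int))) : Prop := out = get_ordered_internal_edges_alt N
instance (N : Int) (out : List ((Int × Int) × (Int × Int))) : Decidable (Spec_get_ordered_internal_edges N out) := by unfold Spec_get_ordered_internal_edges; infer_instance

-- ===== CLAIM (what is proved, stated in full; the proofs are below) =====
def Claim_equal_get_ordered_internal_edges : Prop := ∀ (N : Int), Dom_get_ordered_internal_edges N → Spec_get_ordered_internal_edges N (get_ordered_internal_edges N)

-- ===== LEMMAS AND PROOFS =====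

-- the (up to four) edges B emits for the smaller endpoint (a, b), in emission order
def eRow4 (N a b : Int) : List ((Int × Int) × (Int × Int)) :=
  (if 1 ≤ a ∧ b ≤ N - 1 then [((a, b), (a, b + 1))] else []) ++
  ((if 1 ≤ b then [((a, b), (a + 1, b - 1))] else []) ++
  ((if 1 ≤ b ∧ b ≤ N - 1 then [((a, b), (a + 1, b))] else []) ++
  (if b ≤ N - 1 then [((a, b), (a + 1, b + 1))] else [])))

-- A's four edge families (in A's generation order, flatMap normal form)
def famH (N : Int) : List ((Int × Int) × (Int × Int)) :=
  (PySem.List.pyRange 0 N 1).flatMap fun i => (PySem.List.pyRange 1 N 1).map fun j => ((i, j), (i + 1, j))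
def famV (N : Int) : List ((Int × Int) × (Int × Int)) :=
  (PySem.List.pyRange 0 N 1).flatMap fun i => (PySem.List.pyRange 1 N 1).map fun j => ((j, i), (j, i + 1))
def famD1 (N : Int) : List ((Int × Int) × (Int × Int)) :=
  (PySem.List.pyRange 0 N 1).flatMap fun x => (PySem.List.pyRange 0 N 1).map fun y => ((x, y), (x + 1, y + 1))
def famD2 (N : Int) : List ((Int × Int) × (Int × Int)) :=
  (PySem.List.pyRange 0 N 1).flatMap fun x => (PySem.List.pyRange 0 N 1).map fun y => ((x, y + 1), (x + 1, y))

def edgesA (N : Int) : List ((Int × Int) × (Int × Int)) :=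
  ((PySem.List.pyRange 0 N 1).flatMap fun i => (PySem.List.pyRange 1 N 1).flatMap fun j =>
    [((i, j), (i + 1, j)), ((j, i), (j, i + 1))]) ++
  ((PySem.List.pyRange 0 N 1).flatMap fun x => (PySem.List.pyRange 0 N 1).flatMap fun y =>
    [((x, y), (x + 1, y + 1)), ((x, y + 1), (x + 1, y))])

theorem pvKey_lt_iff (x y : (Int × Int) × (Int × Int)) :
    pvKey x < pvKey y ↔ (x.1.1 < y.1.1 ∨ (x.1.1 = y.1.1 ∧ (x.1.2 < y.1.2 ∨ (x.1.2 = y.1.2 ∧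
      (x.2.1 < y.2.1 ∨ (x.2.1 = y.2.1 ∧ x.2.2 < y.2.2)))))) := by
  obtain ⟨⟨a, b⟩, ⟨c, d⟩⟩ := x
  obtain ⟨⟨a', b'⟩, ⟨c', d'⟩⟩ := y
  simp only [pvKey, Prod.Lex.toLex_lt_toLex, toLex_inj, Prod.mk.injEq]
  omega

theorem pvPairSorted_h (i j : Int) : pvPairSorted (i, j) (i + 1, j) = ((i, j), (i + 1, j)) := by
  rw [pvPairSorted, if_neg]; simp [Prod.Lex.toLex_lt_toLex]

theorem pvPairSorted_v (j i : Int) : pvPairSorted (j, i) (j, i + 1) = ((j, i), (j, i + 1)) := by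
  rw [pvPairSorted, if_neg]; simp [Prod.Lex.toLex_lt_toLex]

theorem pvPairSorted_d1 (x y : Int) : pvPairSorted (x, y) (x + 1, y + 1) = ((x, y), (x + 1, y + 1)) := by
  rw [pvPairSorted, if_neg]; simp [Prod.Lex.toLex_lt_toLex]

theorem pvPairSorted_d2 (x y : Int) : pvPairSorted (x + 1, y) (x, y + 1) = ((x, y + 1), (x + 1, y)) := by
  rw [pvPairSorted, if_pos]; simp [Prod.Lex.toLex_lt_toLex]

theorem a_edges_eq (N : Int) :
    get_ordered_internal_edges N = PySem.List.sorted (edgesA N) pvKey := by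
  simp only [get_ordered_internal_edges, edgesA]
  simp only [pvPairSorted_h, pvPairSorted_v, pvPairSorted_d1, pvPairSorted_d2,
    List.append_assoc, List.cons_append, List.nil_append,
    PySem.List.foldl_append_eq_flatMap]

theorem append_if_singleton {α : Type} (c : Prop) [Decidable c] (l : List α) (e : α) :
    (if c then l ++ [e] else l) = l ++ (if c then [e] else []) := by
  split_ifs <;> simp

theorem alt_eq_flatMap (N : Int) :
    get_ordered_internal_edges_alt N
      = (PySem.List.pyRange 0 N 1).flatMap fun a =>
          (PySem.List.pyRange 0 (N + 1) 1).flatMap fun b => eRow4 N a b := by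
  simp only [get_ordered_internal_edges_alt, eRow4]
  simp only [append_if_singleton]
  simp only [List.append_assoc]
  simp only [PySem.List.foldl_append_eq_flatMap, List.nil_append]

theorem mem_eRow4_fst {N a b : Int} {e : (Int × Int) × (Int × Int)}
    (he : e ∈ eRow4 N a b) : e.1 = (a, b) := by
  simp only [eRow4, List.mem_append] at he
  split_ifs at he <;> simp_all <;> aesop

theorem pairwise_eRow4 (N a b : Int) :
    (eRow4 N a b).Pairwise (fun x y => pvKey x < pvKey y) := by
  simp only [eRow4]
  split_ifs <;> simp [List.pairwise_cons, pvKey_lt_iff]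

theorem pairwise_alt (N : Int) :
    (get_ordered_internal_edges_alt N).Pairwise (fun x y => pvKey x < pvKey y) := by
  rw [alt_eq_flatMap]
  refine List.pairwise_flatMap.mpr ⟨fun a _ => ?_, ?_⟩
  · refine List.pairwise_flatMap.mpr ⟨fun b _ => pairwise_eRow4 N a b, ?_⟩
    refine List.Pairwise.imp ?_ (PySem.List.pairwise_lt_pyRange_one 0 (N + 1))
    intro b1 b2 hlt x hx y hy
    have hx1 := mem_eRow4_fst hx
    have hy1 := mem_eRow4_fst hy
    rw [pvKey_lt_iff]
    simp [hx1, hy1]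
    omega
  · refine List.Pairwise.imp ?_ (PySem.List.pairwise_lt_pyRange_one 0 N)
    intro a1 a2 hlt x hx y hy
    simp only [List.mem_flatMap] at hx hy
    obtain ⟨b1, _, hx⟩ := hx
    obtain ⟨b2, _, hy⟩ := hy
    have hx1 := mem_eRow4_fst hx
    have hy1 := mem_eRow4_fst hy
    rw [pvKey_lt_iff]
    simp [hx1, hy1]
    omega

-- traversal-order swap of a doubly-indexed generation, up to permutation
theorem flatMap_map_swap_perm {α : Type} (l1 l2 : List Int) (f : Int → Int → α) :
    (l1.flatMap fun i => l2.map fun j => f i j).Perm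
      (l2.flatMap fun j => l1.map fun i => f i j) := by
  induction l1 with
  | nil => simp
  | cons a t ih =>
    simp only [List.flatMap_cons, List.map_cons]
    exact (ih.append_left (l2.map (f a))).trans
      (List.map_append_flatMap_perm l2 (fun j => f a j) _)

theorem flatMap_singleton_perm {α : Type} (l : List Int) (f : Int → α) :
    (l.flatMap fun x => [f x]).Perm (l.map f) := by
  have h := List.map_append_flatMap_perm l f (fun _ => ([] : List α))
  have hnil : (l.flatMap fun _ => ([] : List α)) = [] := by induction l <;> simp_all
  rw [hnil, List.append_nil] at h
  simpa using h.symm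

theorem flatMap_pair_perm {α : Type} (l : List Int) (f g : Int → α) :
    (l.flatMap fun x => [f x, g x]).Perm (l.map f ++ l.map g) := by
  refine (List.map_append_flatMap_perm l f (fun x => [g x])).symm.trans ?_
  exact (flatMap_singleton_perm l g).append_left _

theorem perm_A_families (N : Int) :
    (edgesA N).Perm (famH N ++ famV N ++ (famD1 N ++ famD2 N)) := by
  unfold edgesA famH famV famD1 famD2
  refine List.Perm.append ?_ ?_
  · exact (List.Perm.flatMap_left _ (fun i _ => flatMap_pair_perm _ _ _)).trans
      (List.flatMap_append_perm _ _ _).symm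
  · exact (List.Perm.flatMap_left _ (fun x _ => flatMap_pair_perm _ _ _)).trans
      (List.flatMap_append_perm _ _ _).symm

theorem flatMap_if_singleton {α : Type} (l : List Int) (c : Int → Prop) [DecidablePred c]
    (e : Int → α) :
    (l.flatMap fun b => if c b then [e b] else []) = (l.filter fun b => decide (c b)).map e := by
  induction l with
  | nil => rfl
  | cons x t ih =>
    simp only [List.flatMap_cons, List.filter_cons]
    split_ifs with h <;> simp_all

theorem filt_le (N : Int) (hN : 0 < N) :
    (PySem.List.pyRange 0 (N + 1) 1).filter (fun b => decide (b ≤ N - 1))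
      = PySem.List.pyRange 0 N 1 := by
  rw [PySem.List.pyRange_one_append 0 N (N + 1) (by omega) (by omega), List.filter_append,
      PySem.List.pyRange_one_singleton N]
  simp

theorem filt_ge (N : Int) (hN : 0 < N) :
    (PySem.List.pyRange 0 (N + 1) 1).filter (fun b => decide (1 ≤ b))
      = PySem.List.pyRange 1 (N + 1) 1 := by
  rw [PySem.List.pyRange_one_append 0 1 (N + 1) (by omega) (by omega), List.filter_append,
      show PySem.List.pyRange 0 1 1 = [0] by decide]
  simp
  intros
  omega

theorem filt_mid (N : Int) (hN : 0 < N) :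
    (PySem.List.pyRange 0 (N + 1) 1).filter (fun b => decide (1 ≤ b ∧ b ≤ N - 1))
      = PySem.List.pyRange 1 N 1 := by
  rw [PySem.List.pyRange_one_append 0 1 (N + 1) (by omega) (by omega),
      PySem.List.pyRange_one_append 1 N (N + 1) (by omega) (by omega), List.filter_append,
      List.filter_append, show PySem.List.pyRange 0 1 1 = [0] by decide,
      PySem.List.pyRange_one_singleton N]
  simp

theorem shift_eq (N a : Int) :
    (PySem.List.pyRange 1 (N + 1) 1).map (fun b => ((a, b), (a + 1, b - 1)))
      = (PySem.List.pyRange 0 N 1).map (fun y => ((a, y + 1), (a + 1, y))) := by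
  rw [PySem.List.pyRange_one, PySem.List.pyRange_one]
  have h : (N + 1 - 1).toNat = (N - 0).toNat := by omega
  rw [h]
  simp only [List.map_map]
  apply List.map_congr_left
  intro k _
  simp [Prod.ext_iff]
  omega

theorem peel0 {α : Type} (N : Int) (hN : 0 < N) (G : Int → List α) :
    ((PySem.List.pyRange 0 N 1).flatMap fun a => if 1 ≤ a then G a else [])
      = (PySem.List.pyRange 1 N 1).flatMap G := by
  rw [PySem.List.pyRange_one_cons hN]
  simp only [List.flatMap_cons]
  rw [if_neg (by omega)]
  simp only [List.nil_append]
  exact List.flatMap_congr (fun a ha => if_pos (by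
    rw [PySem.List.mem_pyRange_one] at ha; omega))

theorem perm_B_families (N : Int) :
    (get_ordered_internal_edges_alt N).Perm (famH N ++ famV N ++ (famD1 N ++ famD2 N)) := by
  rw [alt_eq_flatMap]
  unfold famH famV famD1 famD2
  by_cases hN : 0 < N
  · have hrow : ∀ a, ((PySem.List.pyRange 0 (N + 1) 1).flatMap fun b => eRow4 N a b).Perm
        ((if 1 ≤ a then (PySem.List.pyRange 0 N 1).map (fun b => ((a, b), (a, b + 1))) else []) ++
         ((PySem.List.pyRange 0 N 1).map (fun y => ((a, y + 1), (a + 1, y))) ++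
          ((PySem.List.pyRange 1 N 1).map (fun j => ((a, j), (a + 1, j))) ++
           (PySem.List.pyRange 0 N 1).map (fun y => ((a, y), (a + 1, y + 1)))))) := by
      intro a
      simp only [eRow4]
      refine (List.flatMap_append_perm _ _ _).symm.trans (List.Perm.append ?_ ?_)
      · rw [flatMap_if_singleton]
        by_cases ha : 1 ≤ a
        · rw [if_pos ha]
          refine List.Perm.of_eq ?_
          rw [List.filter_congr (q := fun b => decide (b ≤ N - 1)) (fun b _ => by simp [ha]),
              filt_le N hN]
        · rw [if_neg ha]
          refine List.Perm.of_eq ?_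
          have : (PySem.List.pyRange 0 (N + 1) 1).filter (fun b => decide (1 ≤ a ∧ b ≤ N - 1)) = [] :=
            List.filter_eq_nil_iff.mpr (fun b _ => by simp [ha])
          rw [this, List.map_nil]
      refine (List.flatMap_append_perm _ _ _).symm.trans (List.Perm.append ?_ ?_)
      · refine List.Perm.of_eq ?_
        rw [flatMap_if_singleton, filt_ge N hN, shift_eq]
      refine (List.flatMap_append_perm _ _ _).symm.trans (List.Perm.append ?_ ?_)
      · exact List.Perm.of_eq (by rw [flatMap_if_singleton, filt_mid N hN])
      · exact List.Perm.of_eq (by rw [flatMap_if_singleton, filt_le N hN])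
    refine (List.Perm.flatMap_left _ (fun a _ => hrow a)).trans ?_
    refine (List.flatMap_append_perm _ _ _).symm.trans ?_
    refine ((((List.flatMap_append_perm _ _ _).symm.trans
      (((List.flatMap_append_perm _ _ _).symm).append_left _)).append_left _)).trans ?_
    -- now: F1 ++ (F2 ++ (F3 ++ F4)) ~ (H ++ V) ++ (D1 ++ D2)
    have hF1V : ((PySem.List.pyRange 0 N 1).flatMap fun a =>
          if 1 ≤ a then (PySem.List.pyRange 0 N 1).map (fun b => ((a, b), (a, b + 1))) else []).Perm
        ((PySem.List.pyRange 0 N 1).flatMap fun i =>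
          (PySem.List.pyRange 1 N 1).map fun j => ((j, i), (j, i + 1))) :=
      (List.Perm.of_eq (peel0 N hN _)).trans
        (flatMap_map_swap_perm (PySem.List.pyRange 0 N 1) (PySem.List.pyRange 1 N 1)
          (fun i j => ((j, i), (j, i + 1)))).symm
    refine (hF1V.append ((List.Perm.refl _))).trans ?_
    -- V ++ (D2 ++ (H ++ D1)) ~ (H ++ V) ++ (D1 ++ D2)
    refine ((List.perm_append_comm_assoc _ _ _).append_left _).trans ?_
    refine (List.perm_append_comm_assoc _ _ _).trans ?_
    refine ((List.perm_append_comm.append_left _).append_left _).trans ?_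
    exact List.Perm.of_eq (List.append_assoc _ _ _).symm
  · have h0 : PySem.List.pyRange 0 N 1 = [] := PySem.List.pyRange_one_eq_nil (by omega)
    simp [h0]

theorem perm_main (N : Int) :
    (get_ordered_internal_edges_alt N).Perm (edgesA N) :=
  (perm_B_families N).trans (perm_A_families N).symm

-- ===== VERDICT (by name: the statement is the Claim_ definition above) =====
theorem get_ordered_internal_edges_spec : Claim_equal_get_ordered_internal_edges := by
  intro N _
  unfold Spec_get_ordered_internal_edges
  rw [a_edges_eq]
  exact PySem.List.sorted_eq_of_perm_of_pairwise_lt _ _ pvKey (perm_main N) (pairwise_alt N)
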